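-- pv_equiv track=rewrite | github.com/zulu27/Ada_2026_Tareas | 1_Tarea/cat.py | calc_final
-- ===== SOURCE A (Python) =====
-- def calc_final(n,k,tallest,workers):
--     i = 0
--     no_trabaja = 0
--     altura = 0
--
--     while i <= k:
--         if i < k:
--             no_trabaja += n**i
--         altura += (n**i) * ((n + 1)**(k - i))
--
--         i += 1
--
--     return [no_trabaja,altura]
-- ===== SOURCE B (Python) =====
-- def calc_final(n, k, tallest, workers):
--     # Closed forms: geometric sum and telescoping weighted power-sum.
--     if k < 0:
--         return [0, 0]
--     no_trabaja = k if n == 1 else (n**k - 1) // (n - 1)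
--     altura = (n + 1)**(k + 1) - n**(k + 1)
--     return [no_trabaja, altura]
-- ===== Notes on version B (the rewrite author's own statement) =====
-- stated objective: faster
-- what changed: Replaced the O(k) accumulation loop by closed forms: the geometric sum (n^k-1)//(n-1) (k when n=1) and the telescoping identity sum n^i(n+1)^(k-i) = (n+1)^(k+1)-n^(k+1).
import Mathlib
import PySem

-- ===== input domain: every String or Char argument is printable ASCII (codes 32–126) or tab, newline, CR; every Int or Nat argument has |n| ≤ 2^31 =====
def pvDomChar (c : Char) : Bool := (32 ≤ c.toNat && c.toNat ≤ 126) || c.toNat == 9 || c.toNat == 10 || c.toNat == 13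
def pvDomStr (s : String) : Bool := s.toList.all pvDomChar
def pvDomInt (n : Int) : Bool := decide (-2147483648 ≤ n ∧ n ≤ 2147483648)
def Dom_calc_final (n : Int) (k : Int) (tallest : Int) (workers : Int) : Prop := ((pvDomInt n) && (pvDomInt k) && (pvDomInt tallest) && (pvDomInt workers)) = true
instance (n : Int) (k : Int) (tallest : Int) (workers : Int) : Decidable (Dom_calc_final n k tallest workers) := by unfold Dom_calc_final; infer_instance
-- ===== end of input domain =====

-- B replaces A's O(k) accumulation loop by closed forms ((n^k-1)//(n-1) and (n+1)^(k+1)-n^(k+1)); return-value equivalence proved for all inputs.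

-- ===== PORT A =====
-- the while-loop of A, state (i, no_trabaja, altura); i starts at 0 so n**i is n ^ i.toNat
def calcALoop (n k i no_trabaja altura : Int) : Int × Int :=
  if i ≤ k then
    calcALoop n k (i + 1)
      (if i < k then no_trabaja + n ^ i.toNat else no_trabaja)
      (altura + n ^ i.toNat * (n + 1) ^ (k - i).toNat)
  else
    (no_trabaja, altura)
termination_by (k + 1 - i).toNat
decreasing_by omega

def calc_final (n : Int) (k : Int) (tallest : Int) (workers : Int) : List Int :=
  let r := calcALoop n k 0 0 0
  [r.1, r.2]

-- ===== PORT B =====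
def calc_final_alt (n : Int) (k : Int) (tallest : Int) (workers : Int) : List Int :=
  if k < 0 then [0, 0]
  else
    let no_trabaja := if n = 1 then k else PySem.Int.floordiv (n ^ k.toNat - 1) (n - 1)
    let altura := (n + 1) ^ (k + 1).toNat - n ^ (k + 1).toNat
    [no_trabaja, altura]

-- ===== PRECONDITION & SPEC =====
def Spec_calc_final (n : Int) (k : Int) (tallest : Int) (workers : Int) (out : List Int) : Prop := out = calc_final_alt n k tallest workers
instance (n : Int) (k : Int) (tallest : Int) (workers : Int) (out : List Int) : Decidable (Spec_calc_final n k tallest workers out) := by unfold Spec_calc_final; infer_instance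

-- ===== CLAIM (what is proved, stated in full; the proofs are below) =====
def Claim_equal_calc_final : Prop := ∀ (n : Int) (k : Int) (tallest : Int) (workers : Int), Dom_calc_final n k tallest workers → Spec_calc_final n k tallest workers (calc_final n k tallest workers)

-- ===== LEMMAS AND PROOFS =====

-- geomS n m = 1 + n + … + n^(m-1)
def geomS (n : Int) : Nat → Int
  | 0 => 0
  | m + 1 => 1 + n * geomS n m

-- wS n m = Σ_{j<m} n^j (n+1)^(m-1-j)
def wS (n : Int) : Nat → Int
  | 0 => 0
  | m + 1 => (n + 1) ^ m + n * wS n m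

theorem geomS_mul (n : Int) (m : Nat) : geomS n m * (n - 1) = n ^ m - 1 := by
  induction m with
  | zero => simp [geomS]
  | succ m ih => simp only [geomS, pow_succ]; linear_combination n * ih

theorem geomS_one (m : Nat) : geomS 1 m = (m : Int) := by
  induction m with
  | zero => simp [geomS]
  | succ m ih => simp [geomS, ih]; omega

theorem wS_closed (n : Int) (m : Nat) : wS n m = (n + 1) ^ m - n ^ m := by
  induction m with
  | zero => simp [wS]
  | succ m ih => simp only [wS, ih, pow_succ]; ring

theorem calcALoop_spec (t : Nat) : ∀ (n k i nt alt : Int), 0 ≤ i → (k + 1 - i).toNat = t →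
    calcALoop n k i nt alt = (nt + n ^ i.toNat * geomS n (t - 1), alt + n ^ i.toNat * wS n t) := by
  induction t with
  | zero =>
    intro n k i nt alt hi ht
    rw [calcALoop, if_neg (by omega)]
    simp [geomS, wS]
  | succ m ih =>
    intro n k i nt alt hi ht
    have hik : i ≤ k := by omega
    rw [calcALoop, if_pos hik]
    rw [ih n k (i + 1) _ _ (by omega) (by omega)]
    have h1 : (i + 1).toNat = i.toNat + 1 := by omega
    have h2 : (k - i).toNat = m := by omega
    rw [h1, h2, pow_succ]
    by_cases hlt : i < k
    · have hm : 1 ≤ m := by omega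
      obtain ⟨m', rfl⟩ : ∃ m', m = m' + 1 := ⟨m - 1, by omega⟩
      rw [if_pos hlt]
      simp only [Nat.add_sub_cancel, geomS, wS]
      rw [Prod.mk.injEq]
      constructor <;> ring
    · have hm : m = 0 := by omega
      subst hm
      rw [if_neg hlt]
      simp only [geomS, wS]
      rw [Prod.mk.injEq]
      constructor <;> ring

theorem floordiv_exact (q b : Int) (hb : b ≠ 0) : PySem.Int.floordiv (q * b) b = q := by
  have h := PySem.Int.floordiv_mul_add_mod (q * b) b
  have hm : PySem.Int.mod (q * b) b = 0 := by
    rw [PySem.Int.mod_eq_zero_iff_dvd]; exact ⟨q, mul_comm q b⟩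
  rw [hm, add_zero] at h
  exact mul_right_cancel₀ hb h

-- ===== VERDICT (by name: the statement is the Claim_ definition above) =====
theorem calc_final_spec : Claim_equal_calc_final := by
  intro n k tallest workers _
  unfold Spec_calc_final calc_final calc_final_alt
  by_cases hk : k < 0
  · rw [calcALoop, if_neg (by omega), if_pos hk]
  · rw [if_neg hk]
    have ht : (k + 1 - 0).toNat = k.toNat + 1 := by omega
    rw [calcALoop_spec (k.toNat + 1) n k 0 0 0 le_rfl ht]
    simp only [Nat.add_sub_cancel, Int.toNat_zero, pow_zero, one_mul, zero_add]
    have hk1 : (k + 1).toNat = k.toNat + 1 := by omega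
    rw [wS_closed, hk1]
    by_cases hn : n = 1
    · subst hn
      rw [if_pos rfl, geomS_one]
      congr 1
      omega
    · rw [if_neg hn]
      have := geomS_mul n k.toNat
      have : n ^ k.toNat - 1 = geomS n k.toNat * (n - 1) := by linarith [geomS_mul n k.toNat]
      rw [this, floordiv_exact _ _ (by omega)]
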